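-- pv_equiv track=rewrite | github.com/FrancoARossi/SySdL-TPs | pruebas.py | a_ErrorOpMat
-- ===== SOURCE A (Python) =====
-- def a_ErrorOpMat (word):
-- 	s = 0
-- 	for c in word:
-- 		if s == 0 and (c == "+" or c == "-" or c == "/" or c == "*"):
-- 			s = 1
-- 		elif s == 1 and (c == "+" or c == "-" or c == "/" or c == "*"):
-- 			s = 2
-- 		elif s == 2 and (c == "+" or c == "-" or c == "/" or c == "*"):
-- 			pass
-- 		else:
-- 			s = -1
-- 			break
-- 	return (s == 2)
-- ===== SOURCE B (Python) =====
-- def a_ErrorOpMat(word):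
--     # A word is an operator-run error iff stripping every operator character
--     # from both ends consumes the whole string, and it has at least 2 chars.
--     return word.strip("+-*/") == "" and len(word) >= 2
-- ===== Notes on version B (the rewrite author's own statement) =====
-- stated objective: simpler
-- what changed: Replaces A's forward state-machine scan (0/1/2/-1 counter with break) by str.strip of the operator characters from both ends: the string is all operators iff the strip result is empty, conjoined with a direct length test.
import Mathlib
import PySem

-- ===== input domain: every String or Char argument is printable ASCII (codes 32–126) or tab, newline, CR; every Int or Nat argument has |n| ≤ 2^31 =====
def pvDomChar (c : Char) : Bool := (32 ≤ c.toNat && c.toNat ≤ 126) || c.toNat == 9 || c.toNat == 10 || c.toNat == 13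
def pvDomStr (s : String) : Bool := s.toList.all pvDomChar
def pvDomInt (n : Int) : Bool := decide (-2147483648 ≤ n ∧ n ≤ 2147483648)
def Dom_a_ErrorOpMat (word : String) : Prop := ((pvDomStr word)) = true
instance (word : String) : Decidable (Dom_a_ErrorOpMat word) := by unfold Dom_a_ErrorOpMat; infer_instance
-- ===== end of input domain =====

-- B replaces A's forward 0/1/2/-1 state-machine scan with break by stripping the operator
-- characters from both ends (empty result = all operators) plus a direct length test; objective: simpler.

-- ===== PORT A =====
-- the loop body of A: state s, early exit (break) modelled by returning -1 immediately
def aOpLoop (s : Int) (cs : List Char) : Int :=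
  match cs with
  | [] => s
  | c :: rest =>
    if s == 0 && (c == '+' || c == '-' || c == '/' || c == '*') then
      aOpLoop 1 rest
    else if s == 1 && (c == '+' || c == '-' || c == '/' || c == '*') then
      aOpLoop 2 rest
    else if s == 2 && (c == '+' || c == '-' || c == '/' || c == '*') then
      aOpLoop s rest
    else
      (-1 : Int)   -- s = -1; break

def a_ErrorOpMat (word : String) : Bool :=
  aOpLoop 0 word.toList == 2

-- ===== PORT B =====
def a_ErrorOpMat_alt (word : String) : Bool :=
  (PySem.Str.stripChars word "+-*/" == "") && decide (2 ≤ PySem.Str.len word)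

-- ===== PRECONDITION & SPEC =====
def Spec_a_ErrorOpMat (word : String) (out : Bool) : Prop := out = a_ErrorOpMat_alt word
instance (word : String) (out : Bool) : Decidable (Spec_a_ErrorOpMat word out) := by unfold Spec_a_ErrorOpMat; infer_instance

-- ===== CLAIM (what is proved, stated in full; the proofs are below) =====
def Claim_equal_a_ErrorOpMat : Prop := ∀ (word : String), Dom_a_ErrorOpMat word → Spec_a_ErrorOpMat word (a_ErrorOpMat word)

-- ===== LEMMAS AND PROOFS =====
def pvIsOp (c : Char) : Bool := c == '+' || c == '-' || c == '/' || c == '*'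

theorem aOpLoop_two (cs : List Char) :
    aOpLoop 2 cs = (if cs.all pvIsOp then 2 else -1) := by
  induction cs with
  | nil => simp [aOpLoop]
  | cons c rest ih =>
    simp only [aOpLoop, List.all_cons, pvIsOp]
    by_cases h : (c == '+' || c == '-' || c == '/' || c == '*') = true
    · simp [h, ih, pvIsOp]
    · simp [h]

theorem aOpLoop_one (cs : List Char) :
    aOpLoop 1 cs = (if cs = [] then 1 else if cs.all pvIsOp then 2 else -1) := by
  cases cs with
  | nil => simp [aOpLoop]
  | cons c rest =>
    simp only [aOpLoop, List.all_cons, pvIsOp]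
    by_cases h : (c == '+' || c == '-' || c == '/' || c == '*') = true
    · simp [h, aOpLoop_two, pvIsOp]
    · simp [h]

theorem main_list (cs : List Char) :
    (aOpLoop 0 cs == 2) = (cs.all pvIsOp && decide (2 ≤ (cs.length : Int))) := by
  cases cs with
  | nil => simp [aOpLoop]
  | cons c rest =>
    by_cases h : (c == '+' || c == '-' || c == '/' || c == '*') = true
    · rw [show aOpLoop 0 (c :: rest) = aOpLoop 1 rest from by simp [aOpLoop, h]]
      rw [aOpLoop_one]
      cases rest with
      | nil => simp [pvIsOp]
      | cons d rs =>
        have hlen : (2 : Int) ≤ (((c :: d :: rs).length : Nat) : Int) := by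
          simp only [List.length_cons]; push_cast; omega
        by_cases hall : ((d :: rs).all pvIsOp) = true
        · simp only [List.all_cons, hall, List.length_cons, pvIsOp] at *
          simp only [h]
          simp
          omega
        · simp [hall, h, pvIsOp]
    · simp [aOpLoop, h, pvIsOp]

theorem contains_eq_isOp (c : Char) : ("+-*/".toList).contains c = pvIsOp c := by
  simp only [pvIsOp, show ("+-*/".toList) = ['+', '-', '*', '/'] from rfl]
  by_cases h1 : c = '+' <;> by_cases h2 : c = '-' <;> by_cases h3 : c = '*' <;>
    by_cases h4 : c = '/' <;> simp [h1, h2, h3, h4]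

theorem dropWhile_all_iff (p : Char → Bool) (l : List Char) :
    (∀ x ∈ l.dropWhile p, p x) ↔ (∀ x ∈ l, p x) := by
  constructor
  · intro h x hx
    rw [← List.takeWhile_append_dropWhile (p := p) (l := l)] at hx
    rcases List.mem_append.1 hx with h1 | h2
    · exact List.mem_takeWhile_imp h1
    · exact h x h2
  · intro h x hx
    exact h x (List.dropWhile_sublist p |>.mem hx)

theorem stripChars_eq_nil_iff (cs : List Char) :
    (PySem.Chars.stripChars cs ("+-*/".toList) = []) ↔ (∀ x ∈ cs, pvIsOp x) := by
  unfold PySem.Chars.stripChars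
  simp only [List.reverse_eq_nil_iff, List.dropWhile_eq_nil_iff, List.mem_reverse,
    contains_eq_isOp]
  exact dropWhile_all_iff pvIsOp cs

-- ===== VERDICT (by name: the statement is the Claim_ definition above) =====
theorem a_ErrorOpMat_spec : Claim_equal_a_ErrorOpMat := by
  intro word _
  unfold Spec_a_ErrorOpMat a_ErrorOpMat a_ErrorOpMat_alt
  rw [PySem.Str.len_eq, main_list]
  congr 1
  have hstrip : (PySem.Str.stripChars word "+-*/" == "") =
      (PySem.Chars.stripChars word.toList ("+-*/".toList)).isEmpty := by
    rw [Bool.eq_iff_iff, beq_iff_eq, List.isEmpty_iff]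
    constructor
    · intro h
      have := congrArg String.toList h
      rwa [PySem.Str.toList_stripChars] at this
    · intro h
      have : (PySem.Str.stripChars word "+-*/").toList = ("" : String).toList := by
        rw [PySem.Str.toList_stripChars, h]; rfl
      exact String.toList_injective this
  rw [hstrip, Bool.eq_iff_iff, List.isEmpty_iff]
  simp only [List.all_eq_true]
  exact (stripChars_eq_nil_iff word.toList).symm
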